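-- pv_equiv track=rewrite | github.com/mbitutu/toy_problems_week3_codechallenge | solution.py | solve
-- ===== SOURCE A (Python) =====
-- def solve(word):
--     consonant_values = {'b': 2, 'c': 3, 'd': 4, 'f': 6, 'g': 7, 'h': 8, 'j': 10,
--                          'k': 11, 'l': 12, 'm': 13, 'n': 14, 'p': 16, 'q': 17,
--                          'r': 18, 's': 19, 't': 20, 'v': 22, 'w': 23, 'x': 24,
--                          'y': 25, 'z': 26}
--
--     max_value = 0
--     current_value = 0
--
--     for char in word:
--         if char in consonant_values:
--             current_value += consonant_values[char]
--             if current_value > max_value: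
--                 max_value = current_value
--         else:
--             current_value = 0
--
--     return max_value
-- ===== SOURCE B (Python) =====
-- def solve(word):
--     consonant_values = {'b': 2, 'c': 3, 'd': 4, 'f': 6, 'g': 7, 'h': 8, 'j': 10,
--                          'k': 11, 'l': 12, 'm': 13, 'n': 14, 'p': 16, 'q': 17,
--                          'r': 18, 's': 19, 't': 20, 'v': 22, 'w': 23, 'x': 24,
--                          'y': 25, 'z': 26}
--     best = 0
--     i, n = 0, len(word)
--     while i < n:
--         if word[i] in consonant_values:
--             # consume this whole maximal consonant run and score it
--             total = consonant_values[word[i]]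
--             j = i + 1
--             while j < n and word[j] in consonant_values:
--                 total += consonant_values[word[j]]
--                 j += 1
--             best = max(best, total)
--             i = j
--         else:
--             i += 1
--     return best
-- ===== Notes on version B (the rewrite author's own statement) =====
-- stated objective: alternative
-- what changed: A keeps a running current/max pair reset on non-consonants; B instead partitions the word into maximal consonant runs with a two-index scan, scores each whole run, and takes the best run total.
import Mathlib
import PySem

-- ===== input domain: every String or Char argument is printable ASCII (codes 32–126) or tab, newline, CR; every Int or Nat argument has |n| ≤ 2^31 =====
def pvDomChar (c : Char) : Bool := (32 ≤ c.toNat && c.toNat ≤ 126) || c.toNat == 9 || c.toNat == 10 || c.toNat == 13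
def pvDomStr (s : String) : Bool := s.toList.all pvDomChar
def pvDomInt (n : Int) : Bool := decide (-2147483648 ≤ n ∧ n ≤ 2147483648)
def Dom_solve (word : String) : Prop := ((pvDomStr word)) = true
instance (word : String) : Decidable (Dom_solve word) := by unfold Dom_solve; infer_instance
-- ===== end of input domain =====

-- B re-implements A's running-max-with-reset as a partition of the word into maximal
-- consonant runs, scoring each run and taking the best (objective: alternative decomposition).

-- ===== PORT A =====
-- the consonant_values dict, shared by both ports (both Pythons define the same literal dict)
def cvDict : PySem.Dict Char Int := PySem.Dict.ofList
  [('b', 2), ('c', 3), ('d', 4), ('f', 6), ('g', 7), ('h', 8), ('j', 10),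
   ('k', 11), ('l', 12), ('m', 13), ('n', 14), ('p', 16), ('q', 17),
   ('r', 18), ('s', 19), ('t', 20), ('v', 22), ('w', 23), ('x', 24),
   ('y', 25), ('z', 26)]

-- A: one fold over the characters carrying (max_value, current_value)
def solve (word : String) : Int :=
  (word.toList.foldl
    (fun (st : Int × Int) ch =>
      match cvDict.get? ch with
      | some v =>
        let cur := st.2 + v
        (if cur > st.1 then cur else st.1, cur)
      | none => (st.1, 0))
    (0, 0)).1

-- ===== PORT B =====
-- inner while loop of B: consume the rest of a maximal consonant run, returning
-- (accumulated run total, remaining characters)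
def consumeRun : List Char → Int → Int × List Char
  | [], acc => (acc, [])
  | c :: cs, acc =>
    match cvDict.get? c with
    | some v => consumeRun cs (acc + v)
    | none => (acc, c :: cs)

theorem consumeRun_rest_length : ∀ (l : List Char) (acc : Int),
    (consumeRun l acc).2.length ≤ l.length := by
  intro l
  induction l with
  | nil => intro acc; simp [consumeRun]
  | cons c cs ih =>
    intro acc
    simp only [consumeRun]
    cases cvDict.get? c with
    | some v => exact le_trans (ih _) (Nat.le_succ _)
    | none => simp

-- outer while loop of B: scan; on a consonant start, score its whole run and skip past it
def scanRuns : List Char → Int → Int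
  | [], best => best
  | c :: cs, best =>
    match cvDict.get? c with
    | some v =>
      let tr := consumeRun cs v
      scanRuns tr.2 (max best tr.1)
    | none => scanRuns cs best
termination_by l => l.length
decreasing_by
  · exact Nat.lt_succ_of_le (consumeRun_rest_length cs v)
  · simp

def solve_alt (word : String) : Int := scanRuns word.toList 0

-- ===== PRECONDITION & SPEC =====
def Spec_solve (word : String) (out : Int) : Prop := out = solve_alt word
instance (word : String) (out : Int) : Decidable (Spec_solve word out) := by unfold Spec_solve; infer_instance

-- ===== CLAIM (what is proved, stated in full; the proofs are below) =====
def Claim_equal_solve : Prop := ∀ (word : String), Dom_solve word → Spec_solve word (solve word)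

-- ===== LEMMAS AND PROOFS =====

-- A's fold step, named for the proofs
def stepA (st : Int × Int) (ch : Char) : Int × Int :=
  match cvDict.get? ch with
  | some v =>
    let cur := st.2 + v
    (if cur > st.1 then cur else st.1, cur)
  | none => (st.1, 0)

theorem solve_eq_foldl (word : String) :
    solve word = (word.toList.foldl stepA (0, 0)).1 := rfl

-- every value stored in the dict is positive
theorem cvDict_pos {c : Char} {v : Int} (h : cvDict.get? c = some v) : 0 < v := by
  have hm := PySem.Dict.mem_items_of_get?_eq_some _ h
  have hall : ∀ p ∈ cvDict.items, 0 < p.2 := by decide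
  exact hall _ hm

-- consuming a run agrees with A's fold: A's running max over the run ends at max m (run total),
-- and its current_value is reset to 0 by the first non-consonant of the rest (if any)
theorem foldA_consume : ∀ (l : List Char) (m acc : Int),
    (l.foldl stepA (max m acc, acc)).1
      = ((consumeRun l acc).2.foldl stepA (max m (consumeRun l acc).1, 0)).1 := by
  intro l
  induction l with
  | nil => intro m acc; simp [consumeRun]
  | cons c cs ih =>
    intro m acc
    cases h : cvDict.get? c with
    | some v =>
      have hv : 0 < v := cvDict_pos h
      have hstep : stepA (max m acc, acc) c = (max m (acc + v), acc + v) := by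
        simp only [stepA, h, Prod.mk.injEq]
        exact ⟨by split <;> omega, trivial⟩
      have hc : consumeRun (c :: cs) acc = consumeRun cs (acc + v) := by
        simp [consumeRun, h]
      rw [List.foldl_cons, hstep, hc]
      exact ih m (acc + v)
    | none =>
      have hstep : stepA (max m acc, acc) c = (max m acc, 0) := by
        simp [stepA, h]
      have hc : consumeRun (c :: cs) acc = (acc, c :: cs) := by
        simp [consumeRun, h]
      rw [hc]
      simp only [List.foldl_cons, hstep]
      rw [show stepA (max m acc, 0) c = (max m acc, 0) from by simp [stepA, h]]

-- main loop correspondence: A's fold from (best, 0) computes B's scan with accumulator best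
theorem foldA_eq_scanRuns : ∀ (n : ℕ) (l : List Char), l.length ≤ n →
    ∀ (best : Int), (l.foldl stepA (best, 0)).1 = scanRuns l best := by
  intro n
  induction n with
  | zero =>
    intro l hl best
    have : l = [] := List.eq_nil_of_length_eq_zero (Nat.le_zero.mp hl)
    subst this; simp [scanRuns]
  | succ n ih =>
    intro l hl best
    cases l with
    | nil => simp [scanRuns]
    | cons c cs =>
      have hcs : cs.length ≤ n := by simpa using hl
      cases h : cvDict.get? c with
      | some v =>
        have hv : 0 < v := cvDict_pos h
        have hstep : stepA (best, 0) c = (max best v, v) := by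
          simp only [stepA, h, Prod.mk.injEq, zero_add]
          exact ⟨by split <;> omega, trivial⟩
        have hr : (consumeRun cs v).2.length ≤ n :=
          le_trans (consumeRun_rest_length cs v) hcs
        have hrhs : scanRuns (c :: cs) best
            = scanRuns (consumeRun cs v).2 (max best (consumeRun cs v).1) := by
          conv_lhs => rw [scanRuns.eq_def]
          simp [h]
        rw [List.foldl_cons, hstep, foldA_consume cs best v, ih _ hr, hrhs]
      | none =>
        have hstep : stepA (best, 0) c = (best, 0) := by simp [stepA, h]
        have hrhs : scanRuns (c :: cs) best = scanRuns cs best := by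
          conv_lhs => rw [scanRuns.eq_def]
          simp [h]
        rw [List.foldl_cons, hstep, ih cs hcs, hrhs]

-- ===== VERDICT (by name: the statement is the Claim_ definition above) =====
theorem solve_spec : Claim_equal_solve := by
  intro word _
  show solve word = solve_alt word
  rw [solve_eq_foldl]
  exact foldA_eq_scanRuns word.toList.length word.toList (le_refl _) 0
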